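-- pv_equiv track=rewrite | github.com/TalitaAnthonio/after-tacl | get-context/correct_sentence_splitter.py | make_paragraphs
-- ===== SOURCE A (Python) =====
-- def make_paragraphs(left_context_splitted):
--     """
--         Function used to make paragraphs from the base sentence to up:
--         Arg: left_context_splitted
--     """
--     before_sent = [elem.strip() for elem in left_context_splitted]
--     before_sent.reverse()
--
--
--     paragraph_reverse = []
--     for sentence in before_sent:
--         if sentence.startswith("#"):
--             index = before_sent.index(sentence)
--             paragraph_reverse = before_sent[:index+1]
--             break
--     paragraph_reverse.reverse()
--     par =  ' '.join([elem + '\n' for elem in paragraph_reverse])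
--     return par
-- ===== SOURCE B (Python) =====
-- def make_paragraphs(left_context_splitted):
--     # One forward pass: a '#' line starts a fresh paragraph string; later
--     # lines are appended to it; lines before any '#' are discarded.
--     par = None
--     for elem in left_context_splitted:
--         e = elem.strip()
--         if e.startswith('#'):
--             par = e + '\n'
--         elif par is not None:
--             par = par + ' ' + e + '\n'
--     return par if par is not None else ''
-- ===== Notes on version B (the rewrite author's own statement) =====
-- stated objective: simpler
-- what changed: A strips, reverses, scans forward with a break, re-finds the element with list.index, slices and reverses again; B makes one forward pass with a running paragraph string that is restarted at every '#'-prefixed line and extended otherwise, so no reversal, no search, no slicing and no join are needed.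
import Mathlib
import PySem

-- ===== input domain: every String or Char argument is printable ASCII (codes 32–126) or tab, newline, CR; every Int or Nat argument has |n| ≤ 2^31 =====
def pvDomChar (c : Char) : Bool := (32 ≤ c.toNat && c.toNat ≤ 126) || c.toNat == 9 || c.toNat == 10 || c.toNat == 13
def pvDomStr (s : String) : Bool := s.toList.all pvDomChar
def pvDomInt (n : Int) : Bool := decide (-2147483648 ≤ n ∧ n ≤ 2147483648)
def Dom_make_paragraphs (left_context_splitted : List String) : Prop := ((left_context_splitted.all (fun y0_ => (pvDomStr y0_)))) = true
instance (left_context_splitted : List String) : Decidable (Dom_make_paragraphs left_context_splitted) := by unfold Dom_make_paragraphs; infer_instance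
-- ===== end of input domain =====

-- B replaces A's reverse/break/index/slice/reverse/join pipeline by a single forward pass
-- that rebuilds the paragraph string from scratch at each '#'-line (simpler, same values).

-- ===== PORT A =====
-- the for-loop over before_sent with its break; `full` is the fixed list before_sent
def pvALoop (full : List String) : List String → List String
  | [] => []
  | x :: xs =>
    if PySem.Str.startswith x "#" then
      match PySem.List.index? full x with
      | some i => PySem.List.slice full (some 0) (some ((i : Int) + 1))
      | none => []      -- unreachable: the scanned element is in `full`
    else pvALoop full xs

def make_paragraphs (left_context_splitted : List String) : String :=
  let before_sent := (left_context_splitted.map PySem.Str.strip).reverse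
  let paragraph_reverse := pvALoop before_sent before_sent
  PySem.Str.join " " (paragraph_reverse.reverse.map (fun elem => elem ++ "\n"))

-- ===== PORT B =====
-- loop body: '#' restarts the paragraph, otherwise extend it if one has started
def pvBStep (par : Option String) (elem : String) : Option String :=
  let e := PySem.Str.strip elem
  if PySem.Str.startswith e "#" then some (e ++ "\n")
  else
    match par with
    | some p => some (p ++ " " ++ e ++ "\n")
    | none => none

def make_paragraphs_alt (left_context_splitted : List String) : String :=
  (left_context_splitted.foldl pvBStep none).getD ""

-- ===== PRECONDITION & SPEC =====
def Spec_make_paragraphs (left_context_splitted : List String) (out : String) : Prop := out = make_paragraphs_alt left_context_splitted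
instance (left_context_splitted : List String) (out : String) : Decidable (Spec_make_paragraphs left_context_splitted out) := by unfold Spec_make_paragraphs; infer_instance

-- ===== CLAIM (what is proved, stated in full; the proofs are below) =====
def Claim_equal_make_paragraphs : Prop := ∀ (left_context_splitted : List String), Dom_make_paragraphs left_context_splitted → Spec_make_paragraphs left_context_splitted (make_paragraphs left_context_splitted)

-- ===== LEMMAS AND PROOFS =====

-- proof-only reference scan: the suffix of the (stripped) list from its last '#'-element
def pvBScan : List String → Option (List String)
  | [] => none
  | x :: xs =>
    match pvBScan xs with
    | some r => some r
    | none => if PySem.Str.startswith x "#" then some (x :: xs) else none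

-- proof-only: the string a started paragraph gains from the remaining elements
def pvTail : List String → String
  | [] => ""
  | y :: ys => " " ++ y ++ "\n" ++ pvTail ys

-- the loop skips a prefix with no '#'-elements
lemma pvALoop_append_of_none (full l2 : List String) :
    ∀ l1 : List String, (∀ y ∈ l1, PySem.Str.startswith y "#" = false) →
      pvALoop full (l1 ++ l2) = pvALoop full l2 := by
  intro l1
  induction l1 with
  | nil => intro _; rfl
  | cons x xs ih =>
    intro h
    have hx := h x (by simp)
    simp only [List.cons_append, pvALoop]
    rw [if_neg (by simpa using hx)]
    exact ih (fun y hy => h y (by simp [hy]))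

-- the loop breaks inside a part that contains a '#'-element
lemma pvALoop_append_of_hit (full l2 : List String) :
    ∀ l1 : List String, (∃ y ∈ l1, PySem.Str.startswith y "#" = true) →
      pvALoop full (l1 ++ l2) = pvALoop full l1 := by
  intro l1
  induction l1 with
  | nil => rintro ⟨y, hy, _⟩; cases hy
  | cons x xs ih =>
    rintro ⟨y, hy, hp⟩
    by_cases hx : PySem.Str.startswith x "#" = true
    · simp only [List.cons_append, pvALoop]
      rw [if_pos hx, if_pos hx]
    · simp only [List.cons_append, pvALoop]
      rw [if_neg hx, if_neg hx]
      have hyxs : y ∈ xs := by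
        rcases List.mem_cons.mp hy with h | h
        · exact absurd (h ▸ hp) hx
        · exact h
      exact ih ⟨y, hyxs, hp⟩

-- extending `full` past the scanned part does not change the loop's result
lemma pvALoop_stable (l t : List String) :
    ∀ scan : List String, (∀ y ∈ scan, y ∈ l) →
      pvALoop (l ++ t) scan = pvALoop l scan := by
  intro scan
  induction scan with
  | nil => intro _; rfl
  | cons x xs ih =>
    intro h
    have hx : x ∈ l := h x (by simp)
    by_cases hp : PySem.Str.startswith x "#" = true
    · simp only [pvALoop]
      rw [if_pos hp, if_pos hp]
      have hsome : (PySem.List.index? l x).isSome := (PySem.List.index?_isSome_iff l x).mpr hx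
      rcases Option.isSome_iff_exists.mp hsome with ⟨i, hi⟩
      have hilt : i < l.length := by
        rcases (PySem.List.index?_eq_some_iff l x i).mp hi with ⟨pre, suf, hsplit, hlen, -⟩
        subst hsplit; simp [← hlen]
      have hfull : PySem.List.index? (l ++ t) x = some i := by
        rw [PySem.List.index?_append_of_mem t hx, hi]
      rw [hfull, hi]
      show PySem.List.slice (l ++ t) (some 0) (some ((i : Int) + 1)) =
           PySem.List.slice l (some 0) (some ((i : Int) + 1))
      have hcast : ((i : Int) + 1) = ((i + 1 : Nat) : Int) := by push_cast; ring
      rw [hcast, PySem.List.slice_zero_start, PySem.List.slice_zero_start,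
          PySem.List.slice_to_natCast, PySem.List.slice_to_natCast,
          List.take_append_of_le_length (by omega)]
    · simp only [pvALoop]
      rw [if_neg hp, if_neg hp]
      exact ih (fun y hy => h y (by simp [hy]))

lemma pvBScan_eq_none_iff (s : List String) :
    pvBScan s = none ↔ ∀ y ∈ s, PySem.Str.startswith y "#" = false := by
  induction s with
  | nil => simp [pvBScan]
  | cons x xs ih =>
    constructor
    · intro h
      simp only [pvBScan] at h
      cases hxs : pvBScan xs with
      | some r => rw [hxs] at h; cases h
      | none =>
        rw [hxs] at h
        intro y hy
        rcases List.mem_cons.mp hy with rfl | hmem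
        · by_contra hc
          rw [Bool.not_eq_false] at hc
          rw [if_pos hc] at h
          cases h
        · exact ih.mp hxs y hmem
    · intro h
      have hxs : pvBScan xs = none := ih.mpr (fun y hy => h y (by simp [hy]))
      simp only [pvBScan, hxs]
      rw [if_neg (by simpa using h x (by simp))]

-- core A-side: the whole A-loop pipeline equals the reference scan
lemma pvCore (s : List String) :
    pvALoop s.reverse s.reverse = ((pvBScan s).getD []).reverse := by
  induction s with
  | nil => rfl
  | cons x xs ih =>
    have hrev : (x :: xs).reverse = xs.reverse ++ [x] := by simp
    rw [hrev]
    cases hxs : pvBScan xs with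
    | some r =>
      have hex : ∃ y ∈ xs.reverse, PySem.Str.startswith y "#" = true := by
        by_contra hc
        push Not at hc
        have hnone : pvBScan xs = none := (pvBScan_eq_none_iff xs).mpr
          (fun y hy => by simpa using hc y (by simp [hy]))
        rw [hnone] at hxs; cases hxs
      rw [pvALoop_append_of_hit _ _ _ hex,
          pvALoop_stable xs.reverse [x] xs.reverse (fun y hy => hy), ih, hxs]
      simp [pvBScan, hxs]
    | none =>
      have hnone : ∀ y ∈ xs.reverse, PySem.Str.startswith y "#" = false := by
        intro y hy
        exact (pvBScan_eq_none_iff xs).mp hxs y (by simpa using hy)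
      rw [pvALoop_append_of_none _ _ _ hnone]
      by_cases hp : PySem.Str.startswith x "#" = true
      · simp only [pvALoop]
        rw [if_pos hp]
        have hx_notmem : x ∉ xs.reverse := fun hmem => by
          have hf := hnone x hmem; rw [hp] at hf; cases hf
        rw [PySem.List.index?_append_singleton_self xs.reverse x hx_notmem]
        show PySem.List.slice (xs.reverse ++ [x]) (some 0) (some ((xs.reverse.length : Int) + 1)) =
             ((pvBScan (x :: xs)).getD []).reverse
        have hcast : ((xs.reverse.length : Int) + 1) = ((xs.reverse.length + 1 : Nat) : Int) := by
          push_cast; ring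
        rw [hcast, PySem.List.slice_zero_start, PySem.List.slice_to_natCast,
            List.take_of_length_le (by simp)]
        simp only [pvBScan, hxs]
        rw [if_pos hp]
        simp
      · simp only [pvALoop]
        rw [if_neg hp]
        simp only [pvBScan, hxs]
        rw [if_neg hp]
        rfl

-- join of '\n'-suffixed pieces with ' ' = head piece ++ the pvTail of the rest
lemma pvJoin_cons (x : String) (xs : List String) :
    PySem.Str.join " " ((x :: xs).map (fun elem => elem ++ "\n")) = x ++ "\n" ++ pvTail xs := by
  induction xs generalizing x with
  | nil => simp [PySem.Str.join, PySem.Chars.join, pvTail, List.intercalate]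
  | cons y ys ih =>
    have h : PySem.Str.join " " ((x :: y :: ys).map (fun elem => elem ++ "\n")) =
        (x ++ "\n") ++ " " ++ PySem.Str.join " " ((y :: ys).map (fun elem => elem ++ "\n")) := by
      apply String.toList_injective
      simp [PySem.Str.join, PySem.Chars.join_cons_cons]
    rw [h, ih y]
    apply String.toList_injective
    simp [pvTail]

-- core B-side: the forward fold equals the reference scan + join
lemma pvFold (l : List String) : ∀ par0 : Option String,
    List.foldl pvBStep par0 l =
      match pvBScan (l.map PySem.Str.strip) with
      | some r => some (PySem.Str.join " " (r.map (fun elem => elem ++ "\n")))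
      | none => par0.map (fun p => p ++ pvTail (l.map PySem.Str.strip)) := by
  induction l with
  | nil => intro par0; cases par0 <;> simp [pvBScan, pvTail]
  | cons x xs ih =>
    intro par0
    rw [List.foldl_cons, ih]
    simp only [List.map_cons]
    cases hs : pvBScan (xs.map PySem.Str.strip) with
    | some r => simp only [pvBScan, hs]
    | none =>
      simp only [pvBScan, hs]
      by_cases hp : PySem.Str.startswith (PySem.Str.strip x) "#" = true
      · rw [if_pos hp]
        simp only [pvBStep]
        rw [if_pos hp]
        exact congrArg some (pvJoin_cons (PySem.Str.strip x) (xs.map PySem.Str.strip)).symm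
      · rw [if_neg hp]
        simp only [pvBStep]
        rw [if_neg hp]
        cases par0 with
        | none => rfl
        | some p =>
          simp only [Option.map_some, pvTail]
          apply congrArg some
          apply String.toList_injective
          simp

-- ===== VERDICT (by name: the statement is the Claim_ definition above) =====
theorem make_paragraphs_spec : Claim_equal_make_paragraphs := by
  intro l _
  show make_paragraphs l = make_paragraphs_alt l
  show PySem.Str.join " "
      ((pvALoop ((l.map PySem.Str.strip).reverse) ((l.map PySem.Str.strip).reverse)).reverse.map
        (fun elem => elem ++ "\n")) = make_paragraphs_alt l
  rw [pvCore (l.map PySem.Str.strip), List.reverse_reverse]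
  show _ = (List.foldl pvBStep none l).getD ""
  rw [pvFold l none]
  cases h : pvBScan (l.map PySem.Str.strip) with
  | some r => simp
  | none => simp [PySem.Str.join]
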